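-- pv_equiv track=rewrite | github.com/vishwajit-vishnu/Memory-efficient-Stochastic-methods-for-Memory-based-Transformers | optim.py | get_head_sizes_v2
-- ===== SOURCE A (Python) =====
-- def get_head_sizes_v2(n_heads,hidden_size, variable_size_heads):
--     li=None
--     if(variable_size_heads):
--         # the size of all heads will be atleast temp;
--         temp= hidden_size//n_heads;
--         temp2= hidden_size//(4*n_heads);
--         li=[temp]*n_heads;
--         for i in range(n_heads//4):
--             li[i]= temp-temp2;
--         for i in range(n_heads//4,n_heads//2):
--             li[i] = temp+temp2;
--
--     return li;
-- ===== SOURCE B (Python) =====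
-- def get_head_sizes_v2(n_heads, hidden_size, variable_size_heads):
--     if not variable_size_heads:
--         return None
--     base = hidden_size // n_heads
--     delta = hidden_size // (4 * n_heads)
--
--     def size_of(i):
--         # head i is in the first quarter iff i < n_heads//4, i.e. 4*(i+1) <= n_heads;
--         # in the second quarter iff i < n_heads//2, i.e. 2*(i+1) <= n_heads.
--         if 4 * (i + 1) <= n_heads:
--             return base - delta
--         if 2 * (i + 1) <= n_heads:
--             return base + delta
--         return base
--
--     return [size_of(i) for i in range(n_heads)]
-- ===== Notes on version B (the rewrite author's own statement) =====
-- stated objective: alternative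
-- what changed: B computes each head's size directly from its index by a multiplicative quarter/half classification (4*(i+1)<=n, 2*(i+1)<=n) in one comprehension pass, instead of preallocating a uniform list and overwriting prefix slots with two floor-division-bounded index loops.
import Mathlib
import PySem

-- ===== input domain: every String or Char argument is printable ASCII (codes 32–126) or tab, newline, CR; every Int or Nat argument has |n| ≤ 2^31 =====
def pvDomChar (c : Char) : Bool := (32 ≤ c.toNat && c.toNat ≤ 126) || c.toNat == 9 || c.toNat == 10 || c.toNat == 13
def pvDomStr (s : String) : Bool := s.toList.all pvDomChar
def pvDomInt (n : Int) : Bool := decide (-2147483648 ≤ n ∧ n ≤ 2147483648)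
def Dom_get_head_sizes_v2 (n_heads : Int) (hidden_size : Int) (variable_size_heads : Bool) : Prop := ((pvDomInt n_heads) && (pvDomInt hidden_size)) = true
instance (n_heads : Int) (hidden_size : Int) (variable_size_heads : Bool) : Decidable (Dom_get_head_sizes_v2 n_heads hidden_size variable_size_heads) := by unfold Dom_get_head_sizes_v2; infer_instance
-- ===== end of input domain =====

-- B computes each head's size directly from its index by a multiplicative quarter/half
-- classification in one pass, instead of preallocating a uniform list and patching prefixes
-- with two index loops (objective: alternative decomposition, same cost).

-- ===== PORT A =====
def get_head_sizes_v2 (n_heads : Int) (hidden_size : Int) (variable_size_heads : Bool) : Option (List Int) :=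
  if variable_size_heads then
    let temp := PySem.Int.floordiv hidden_size n_heads
    let temp2 := PySem.Int.floordiv hidden_size (4 * n_heads)
    let li := List.replicate n_heads.toNat temp
    let li := (PySem.List.pyRange 0 (PySem.Int.floordiv n_heads 4) 1).foldl
      (fun acc i => PySem.List.pySetD acc i (temp - temp2)) li
    let li := (PySem.List.pyRange (PySem.Int.floordiv n_heads 4) (PySem.Int.floordiv n_heads 2) 1).foldl
      (fun acc i => PySem.List.pySetD acc i (temp + temp2)) li
    some li
  else none

-- ===== PORT B =====
def pvSizeOf (n_heads base delta i : Int) : Int :=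
  if 4 * (i + 1) ≤ n_heads then base - delta
  else if 2 * (i + 1) ≤ n_heads then base + delta
  else base

def get_head_sizes_v2_alt (n_heads : Int) (hidden_size : Int) (variable_size_heads : Bool) : Option (List Int) :=
  if variable_size_heads then
    let base := PySem.Int.floordiv hidden_size n_heads
    let delta := PySem.Int.floordiv hidden_size (4 * n_heads)
    some ((PySem.List.pyRange 0 n_heads 1).map (pvSizeOf n_heads base delta))
  else none

-- ===== PRECONDITION & SPEC =====
-- Pre_ excludes only n_heads = 0 with variable_size_heads, where A raises ZeroDivisionError (B raises there too).
def Pre_get_head_sizes_v2 (n_heads : Int) (hidden_size : Int) (variable_size_heads : Bool) : Prop :=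
  variable_size_heads = true → n_heads ≠ 0
instance (n_heads : Int) (hidden_size : Int) (variable_size_heads : Bool) : Decidable (Pre_get_head_sizes_v2 n_heads hidden_size variable_size_heads) := by unfold Pre_get_head_sizes_v2; infer_instance
def pvWitness_get_head_sizes_v2 : Int × Int × Bool := (8, 512, true)

def Spec_get_head_sizes_v2 (n_heads : Int) (hidden_size : Int) (variable_size_heads : Bool) (out : Option (List Int)) : Prop := out = get_head_sizes_v2_alt n_heads hidden_size variable_size_heads
instance (n_heads : Int) (hidden_size : Int) (variable_size_heads : Bool) (out : Option (List Int)) : Decidable (Spec_get_head_sizes_v2 n_heads hidden_size variable_size_heads out) := by unfold Spec_get_head_sizes_v2; infer_instance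

-- ===== CLAIM =====
def Claim_equal_get_head_sizes_v2 : Prop := ∀ (n_heads : Int) (hidden_size : Int) (variable_size_heads : Bool), Dom_get_head_sizes_v2 n_heads hidden_size variable_size_heads → Pre_get_head_sizes_v2 n_heads hidden_size variable_size_heads → Spec_get_head_sizes_v2 n_heads hidden_size variable_size_heads (get_head_sizes_v2 n_heads hidden_size variable_size_heads)

-- ===== LEMMAS AND PROOFS =====

-- Folding index-assignment of a constant over range(a, a+k) paints the slice [a, a+k) with v.
theorem foldl_setD_range (v : Int) : ∀ (k : Nat) (a : Nat) (l : List Int), a + k ≤ l.length →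
    (PySem.List.pyRange (a : Int) ((a : Int) + (k : Int)) 1).foldl
      (fun acc i => PySem.List.pySetD acc i v) l
    = l.take a ++ List.replicate k v ++ l.drop (a + k) := by
  intro k
  induction k with
  | zero =>
    intro a l h
    rw [PySem.List.pyRange_one_eq_nil (by omega : ((a:Int) + (0:Nat)) ≤ (a:Int))]
    simp
  | succ k ih =>
    intro a l h
    rw [PySem.List.pyRange_one_cons (by push_cast; omega)]
    simp only [List.foldl_cons, PySem.List.pySetD_natCast]
    have hstep : ((a:Int) + 1 : Int) = ((a + 1 : Nat) : Int) := by push_cast; ring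
    have hend : ((a:Int) + ((k+1 : Nat) : Int)) = ((a + 1 : Nat) : Int) + (k : Int) := by push_cast; ring
    rw [hstep, hend, ih (a+1) (l.set a v) (by simp; omega)]
    have ha : a < l.length := by omega
    rw [List.set_eq_take_cons_drop v ha]
    have hlt : (l.take a).length = a := by simp; omega
    have h1 : ((l.take a) ++ (v :: l.drop (a+1))).take (a+1) = l.take a ++ [v] := by
      rw [List.take_append, hlt]
      have e : a + 1 - a = 1 := by omega
      simp [e]
    have h2 : ((l.take a) ++ (v :: l.drop (a+1))).drop (a+1+k) = l.drop (a+1+k) := by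
      rw [List.drop_append, hlt]
      have e : a + 1 + k - a = k + 1 := by omega
      have e2 : (l.take a).drop (a+1+k) = [] := by
        apply List.drop_eq_nil_of_le; simp; omega
      rw [e, e2, List.nil_append, List.drop_succ_cons, List.drop_drop]
    rw [h1, h2]
    have e3 : a + 1 + k = a + (k+1) := by omega
    rw [e3, List.append_assoc]
    simp [List.replicate_succ]

-- Mapping a function that is constant on a range yields a replicate of that constant.
theorem map_const_on_pyRange (f : Int → Int) (a b c : Int)
    (h : ∀ i, a ≤ i → i < b → f i = c) :
    (PySem.List.pyRange a b 1).map f = List.replicate (b - a).toNat c := by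
  have h1 : (PySem.List.pyRange a b 1).map f = (PySem.List.pyRange a b 1).map (fun _ => c) := by
    apply List.map_congr_left
    intro i hi
    rw [PySem.List.mem_pyRange_one] at hi
    exact h i hi.1 hi.2
  rw [h1, List.map_const', PySem.List.length_pyRange_one]

-- ===== VERDICT =====
theorem get_head_sizes_v2_spec : Claim_equal_get_head_sizes_v2 := by
  intro n h v _ hpre
  unfold Spec_get_head_sizes_v2 get_head_sizes_v2 get_head_sizes_v2_alt
  cases v with
  | false => simp
  | true =>
    have hn : n ≠ 0 := hpre rfl
    simp only [if_true]
    have h4 : PySem.Int.floordiv n 4 = n / 4 := PySem.Int.floordiv_eq_ediv_of_pos (by omega)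
    have h2 : PySem.Int.floordiv n 2 = n / 2 := PySem.Int.floordiv_eq_ediv_of_pos (by omega)
    set t := PySem.Int.floordiv h n
    set t2 := PySem.Int.floordiv h (4 * n)
    rcases lt_or_gt_of_ne hn with hneg | hpos
    · -- n < 0 : both sides are some []
      have e1 : PySem.List.pyRange 0 (PySem.Int.floordiv n 4) 1 = [] :=
        PySem.List.pyRange_one_eq_nil (by rw [h4]; omega)
      have e2 : PySem.List.pyRange (PySem.Int.floordiv n 4) (PySem.Int.floordiv n 2) 1 = [] :=
        PySem.List.pyRange_one_eq_nil (by rw [h4, h2]; omega)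
      have e3 : PySem.List.pyRange 0 n 1 = [] :=
        PySem.List.pyRange_one_eq_nil (by omega)
      have hN : n.toNat = 0 := by omega
      rw [e1, e2, e3]
      simp [hN]
    · -- n > 0
      set N := n.toNat with hNdef
      have hq4 : (PySem.Int.floordiv n 4) = ((PySem.Int.floordiv n 4).toNat : Int) := by rw [h4]; omega
      have hq2 : (PySem.Int.floordiv n 2) = ((PySem.Int.floordiv n 2).toNat : Int) := by rw [h2]; omega
      set k4 := (PySem.Int.floordiv n 4).toNat with hk4
      set k2 := (PySem.Int.floordiv n 2).toNat with hk2
      have hk42 : k4 ≤ k2 := by rw [hk4, hk2, h4, h2]; omega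
      have hk2N : k2 ≤ N := by rw [hk2, h2, hNdef]; omega
      -- A side: paint the two prefix slices
      have step1 : (PySem.List.pyRange 0 (PySem.Int.floordiv n 4) 1).foldl
          (fun acc i => PySem.List.pySetD acc i (t - t2)) (List.replicate N t)
          = List.replicate k4 (t - t2) ++ List.replicate (N - k4) t := by
        have := foldl_setD_range (t - t2) k4 0 (List.replicate N t) (by simp; omega)
        simp only [Nat.cast_zero, zero_add, List.take_zero, List.nil_append] at this
        rw [hq4, this, List.drop_replicate]
      rw [step1]
      have step2 : (PySem.List.pyRange (PySem.Int.floordiv n 4) (PySem.Int.floordiv n 2) 1).foldl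
          (fun acc i => PySem.List.pySetD acc i (t + t2))
          (List.replicate k4 (t - t2) ++ List.replicate (N - k4) t)
          = List.replicate k4 (t - t2) ++ List.replicate (k2 - k4) (t + t2) ++ List.replicate (N - k2) t := by
        have hlen : k4 + (k2 - k4) ≤ (List.replicate k4 (t - t2) ++ List.replicate (N - k4) t).length := by
          simp; omega
        have heq : PySem.Int.floordiv n 2 = ((k4 : Int) + ((k2 - k4 : Nat) : Int)) := by
          rw [hq2]; omega
        have := foldl_setD_range (t + t2) (k2 - k4) k4
          (List.replicate k4 (t - t2) ++ List.replicate (N - k4) t) hlen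
        rw [hq4, heq, this]
        rw [List.take_append, List.drop_append]
        have c1 : k4 - (k4 + (k2 - k4)) = 0 := by omega
        have c3 : N - k4 - (k2 - k4) = N - k2 := by omega
        simp [List.take_replicate, List.drop_replicate, c1, c3]
      rw [step2]
      -- B side: split the index range at the quarter and half boundaries
      have hsplit1 : PySem.List.pyRange 0 n 1
          = PySem.List.pyRange 0 (PySem.Int.floordiv n 4) 1
            ++ PySem.List.pyRange (PySem.Int.floordiv n 4) n 1 :=
        PySem.List.pyRange_one_append 0 (PySem.Int.floordiv n 4) n (by rw [h4]; omega) (by rw [h4]; omega)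
      have hsplit2 : PySem.List.pyRange (PySem.Int.floordiv n 4) n 1
          = PySem.List.pyRange (PySem.Int.floordiv n 4) (PySem.Int.floordiv n 2) 1
            ++ PySem.List.pyRange (PySem.Int.floordiv n 2) n 1 :=
        PySem.List.pyRange_one_append (PySem.Int.floordiv n 4) (PySem.Int.floordiv n 2) n
          (by rw [h4, h2]; omega) (by rw [h2]; omega)
      rw [hsplit1, hsplit2, List.map_append, List.map_append]
      have b1 : (PySem.List.pyRange 0 (PySem.Int.floordiv n 4) 1).map (pvSizeOf n t t2)
          = List.replicate k4 (t - t2) := by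
        rw [map_const_on_pyRange (pvSizeOf n t t2) 0 (PySem.Int.floordiv n 4) (t - t2)
          (by intro i h0 hi; rw [h4] at hi; unfold pvSizeOf; rw [if_pos (by omega)])]
        congr 1
        rw [h4]; omega
      have b2 : (PySem.List.pyRange (PySem.Int.floordiv n 4) (PySem.Int.floordiv n 2) 1).map (pvSizeOf n t t2)
          = List.replicate (k2 - k4) (t + t2) := by
        rw [map_const_on_pyRange (pvSizeOf n t t2) (PySem.Int.floordiv n 4) (PySem.Int.floordiv n 2) (t + t2)
          (by intro i h0 hi; rw [h4] at h0; rw [h2] at hi; unfold pvSizeOf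
              rw [if_neg (by omega), if_pos (by omega)])]
        congr 1
        rw [h4, h2]; omega
      have b3 : (PySem.List.pyRange (PySem.Int.floordiv n 2) n 1).map (pvSizeOf n t t2)
          = List.replicate (N - k2) t := by
        rw [map_const_on_pyRange (pvSizeOf n t t2) (PySem.Int.floordiv n 2) n t
          (by intro i h0 hi; rw [h2] at h0; unfold pvSizeOf
              rw [if_neg (by omega), if_neg (by omega)])]
        congr 1
        rw [h2, hNdef]; omega
      rw [b1, b2, b3, List.append_assoc]
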